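-- pv_equiv track=rewrite | github.com/dynamik-dev/agentic-lint | pipeline/pipeline.py | _cap_write_content
-- ===== SOURCE A (Python) =====
-- _WRITE_HEAD_LINES = 100
--
-- _WRITE_TAIL_LINES = 50
--
-- _WRITE_MAX_LINES = 200
--
-- def _cap_write_content(content: str) -> str:
--     """Return line-numbered content; if too long, slice head + tail with a marker."""
--     lines = content.splitlines()
--     total = len(lines)
--     if total <= _WRITE_MAX_LINES:
--         return _line_number(content)
--
--     width = max(3, len(str(total)))
--     head = lines[:_WRITE_HEAD_LINES]
--     tail = lines[total - _WRITE_TAIL_LINES :]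
--     out: list[str] = []
--     for i, line in enumerate(head, start=1):
--         out.append(f"{i:>{width}}: {line}")
--     truncated = total - _WRITE_HEAD_LINES - _WRITE_TAIL_LINES
--     out.append(f"... {truncated} lines truncated ...")
--     tail_start = total - _WRITE_TAIL_LINES + 1
--     for i, line in enumerate(tail, start=tail_start):
--         out.append(f"{i:>{width}}: {line}")
--     return "\n".join(out)
--
-- def _line_number(content: str) -> str:
--     """Prefix each line with `NNNN:` for line-anchored evaluation."""
--     lines = content.splitlines()
--     width = max(3, len(str(len(lines))))
--     return "\n".join(f"{i:>{width}}: {line}" for i, line in enumerate(lines, start=1))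
-- ===== SOURCE B (Python) =====
-- _WRITE_HEAD_LINES = 100
--
-- _WRITE_TAIL_LINES = 50
--
-- _WRITE_MAX_LINES = 200
--
--
-- def _cap_write_content(content: str) -> str:
--     """Single pass: walk the lines once, skipping the middle and emitting the marker inline."""
--     lines = content.splitlines()
--     total = len(lines)
--     width = max(3, len(str(total)))
--     skip = total > _WRITE_MAX_LINES
--     out = []
--     for i, line in enumerate(lines, start=1):
--         if skip and i == _WRITE_HEAD_LINES + 1:
--             out.append(f"... {total - _WRITE_HEAD_LINES - _WRITE_TAIL_LINES} lines truncated ...")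
--         if skip and _WRITE_HEAD_LINES < i <= total - _WRITE_TAIL_LINES:
--             continue
--         out.append(f"{i:>{width}}: {line}")
--     return "\n".join(out)
-- ===== Notes on version B (the rewrite author's own statement) =====
-- stated objective: alternative
-- what changed: B is one pass over the lines with an accumulator: it walks every numbered line once, skips those in the middle region by an index test, and emits the truncation marker inline when crossing the head boundary, instead of A's staged slicing into head/tail lists numbered by two separately-offset loops.
import Mathlib
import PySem

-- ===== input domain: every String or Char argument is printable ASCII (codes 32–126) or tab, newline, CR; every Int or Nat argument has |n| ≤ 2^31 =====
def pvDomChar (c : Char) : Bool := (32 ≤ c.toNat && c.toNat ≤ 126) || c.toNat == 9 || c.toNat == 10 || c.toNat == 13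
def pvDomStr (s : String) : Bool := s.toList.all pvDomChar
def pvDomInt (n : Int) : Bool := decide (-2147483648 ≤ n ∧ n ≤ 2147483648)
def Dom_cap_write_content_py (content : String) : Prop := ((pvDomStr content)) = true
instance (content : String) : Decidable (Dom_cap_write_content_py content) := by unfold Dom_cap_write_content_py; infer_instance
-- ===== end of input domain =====

-- B replaces A's staged slicing (head list + tail list, two offset loops) by ONE pass over the
-- enumerated lines that skips the middle by an index test and emits the marker inline (objective: alternative).

-- shared helper: the f-string "{i:>{width}}: {line}" (right-justified with spaces, no truncation)
def pvFmt (width : Int) (i : Int) (line : String) : String :=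
  PySem.Str.join ""
    [String.ofList (List.replicate (width - PySem.Str.len (PySem.Int.toStr i)).toNat ' '),
     PySem.Int.toStr i, ": ", line]

-- ===== PORT A =====
-- port of _line_number
def line_number_py (content : String) : String :=
  let lines := PySem.Str.splitlines content
  let width : Int := max 3 (PySem.Str.len (PySem.Int.toStr (lines.length : Int)))
  PySem.Str.join "\n" ((PySem.List.enumerate lines 1).map (fun p => pvFmt width p.1 p.2))

def cap_write_content_py (content : String) : String :=
  let lines := PySem.Str.splitlines content
  let total : Int := lines.length
  if total ≤ 200 then line_number_py content
  else
    let width : Int := max 3 (PySem.Str.len (PySem.Int.toStr total))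
    let head := PySem.List.slice lines none (some 100)
    let tail := PySem.List.slice lines (some (total - 50)) none
    let out := (PySem.List.enumerate head 1).map (fun p => pvFmt width p.1 p.2)
    let truncated := total - 100 - 50
    let out := out ++ [PySem.Str.join "" ["... ", PySem.Int.toStr truncated, " lines truncated ..."]]
    let tail_start := total - 50 + 1
    let out := out ++ (PySem.List.enumerate tail tail_start).map (fun p => pvFmt width p.1 p.2)
    PySem.Str.join "\n" out

-- ===== PORT B =====
def cap_write_content_py_alt (content : String) : String :=
  let lines := PySem.Str.splitlines content
  let total : Int := lines.length
  let width : Int := max 3 (PySem.Str.len (PySem.Int.toStr total))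
  let skip : Bool := 200 < total
  let out := (PySem.List.enumerate lines 1).foldl (fun out p =>
    let out := if skip ∧ p.1 = 101 then
        out ++ [PySem.Str.join "" ["... ", PySem.Int.toStr (total - 100 - 50), " lines truncated ..."]]
      else out
    if skip ∧ 100 < p.1 ∧ p.1 ≤ total - 50 then out
    else out ++ [pvFmt width p.1 p.2]) []
  PySem.Str.join "\n" out

-- ===== PRECONDITION & SPEC =====
def Spec_cap_write_content_py (content : String) (out : String) : Prop := out = cap_write_content_py_alt content
instance (content : String) (out : String) : Decidable (Spec_cap_write_content_py content out) := by unfold Spec_cap_write_content_py; infer_instance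

-- ===== CLAIM =====
def Claim_equal_cap_write_content_py : Prop := ∀ (content : String), Dom_cap_write_content_py content → Spec_cap_write_content_py content (cap_write_content_py content)

-- ===== LEMMAS AND PROOFS =====

-- B's single-pass loop, characterised: it flat-maps each enumerated line to marker/kept/skipped pieces
theorem pv_fold_eq (skip : Bool) (total width : Int) (marker : String)
    (l : List (Int × String)) (acc : List String) :
    l.foldl (fun out p =>
      let out := if skip ∧ p.1 = 101 then out ++ [marker] else out
      if skip ∧ 100 < p.1 ∧ p.1 ≤ total - 50 then out
      else out ++ [pvFmt width p.1 p.2]) acc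
    = acc ++ l.flatMap (fun p =>
        (if skip ∧ p.1 = 101 then [marker] else [])
        ++ (if skip ∧ 100 < p.1 ∧ p.1 ≤ total - 50 then []
            else [pvFmt width p.1 p.2])) := by
  induction l generalizing acc with
  | nil => simp
  | cons x xs ih =>
    simp only [List.foldl_cons, List.flatMap_cons, ih]
    split_ifs <;> simp

-- flatMap collapses to map when g is a singleton on every element
theorem pv_flatMap_eq_map {α β : Type} (l : List α) (g : α → List β) (f : α → β)
    (h : ∀ a ∈ l, g a = [f a]) : l.flatMap g = l.map f := by
  induction l with
  | nil => simp
  | cons x xs ih =>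
    simp only [List.flatMap_cons, List.map_cons, h x (by simp)]
    rw [ih (fun a ha => h a (by simp [ha]))]
    simp

theorem pv_flatMap_eq_nil {α β : Type} (l : List α) (g : α → List β)
    (h : ∀ a ∈ l, g a = []) : l.flatMap g = [] := by
  induction l with
  | nil => simp
  | cons x xs ih => simp [List.flatMap_cons, h x (by simp), ih fun a ha => h a (by simp [ha])]

-- index bounds of enumerate members
theorem pv_enum_bounds {α : Type} (xs : List α) (s : Int) (p : Int × α)
    (h : p ∈ PySem.List.enumerate xs s) : s ≤ p.1 ∧ p.1 < s + xs.length := by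
  rcases (PySem.List.mem_enumerate_iff xs s p).1 h with ⟨k, hk, rfl⟩
  constructor <;> simp
  omega

-- ===== VERDICT =====
theorem cap_write_content_py_spec : Claim_equal_cap_write_content_py := by
  intro content _
  unfold Spec_cap_write_content_py cap_write_content_py cap_write_content_py_alt line_number_py
  set lines := PySem.Str.splitlines content with hl
  dsimp only
  rw [pv_fold_eq, List.nil_append]
  by_cases h : (lines.length : Int) ≤ 200
  · -- not truncated: skip = false, the single pass keeps every formatted line
    simp only [if_pos h]
    rw [pv_flatMap_eq_map _ _ (fun p => pvFmt (max 3 (PySem.Str.len (PySem.Int.toStr (lines.length : Int)))) p.1 p.2)]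
    intro p _
    have hskip : ¬ ((200:Int) < (lines.length:Int)) := by omega
    simp [hskip]
  · -- truncated: split lines into head ++ middle ++ tail and evaluate the pass per region
    have hlen : 200 < lines.length := by exact_mod_cast not_le.1 h
    have hskip : ((200:Int) < (lines.length:Int)) := by exact_mod_cast hlen
    simp only [if_neg h]
    rw [PySem.List.slice_to _ (by norm_num), PySem.List.slice_from _ (by omega)]
    have htoNat : ((lines.length:Int) - 50).toNat = lines.length - 50 := by omega
    rw [htoNat, show ((100:Int)).toNat = 100 from rfl]
    have hlt100 : (lines.take 100).length = 100 := by rw [List.length_take]; omega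
    have hmidlen : ((lines.drop 100).take (lines.length - 150)).length = lines.length - 150 := by
      rw [List.length_take, List.length_drop]; omega
    -- decompose lines = take 100 ++ middle ++ drop (len - 50)
    have hdd : (lines.drop 100).drop (lines.length - 150) = lines.drop (lines.length - 50) := by
      rw [List.drop_drop, show 100 + (lines.length - 150) = lines.length - 50 from by omega]
    have hmid3 : ((lines.drop 100).take (lines.length - 150))
        ++ lines.drop (lines.length - 50) = lines.drop 100 := by
      rw [← hdd, List.take_append_drop]
    have hdecomp : lines = lines.take 100 ++ ((lines.drop 100).take (lines.length - 150)
        ++ lines.drop (lines.length - 50)) := by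
      rw [hmid3, List.take_append_drop]
    have hmidne : ((lines.drop 100).take (lines.length - 150)) ≠ [] := by
      intro hnil
      rw [hnil] at hmidlen
      simp at hmidlen
      omega
    obtain ⟨m, rest, hmr⟩ := List.exists_cons_of_ne_nil hmidne
    have hrestlen : rest.length = lines.length - 151 := by
      have hx := hmidlen
      rw [hmr] at hx
      simp at hx
      omega
    -- the enumeration splits into the three regions with the right starting indices
    have henum : PySem.List.enumerate lines 1
        = PySem.List.enumerate (lines.take 100) 1
          ++ (((101:Int), m) :: (PySem.List.enumerate rest 102
          ++ PySem.List.enumerate (lines.drop (lines.length - 50)) ((lines.length:Int) - 50 + 1))) := by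
      conv_lhs => rw [hdecomp]
      rw [PySem.List.enumerate_append, hmr, PySem.List.enumerate_append,
          PySem.List.enumerate_cons, hlt100]
      have e1 : ((1:Int) + ((100:Nat):Int)) = 101 := by norm_num
      have e3 : ((101:Int) + (((m :: rest).length : Nat) : Int))
          = (lines.length:Int) - 50 + 1 := by
        rw [List.length_cons, hrestlen]; push_cast; omega
      rw [e1, e3, show ((101:Int) + 1) = 102 from by norm_num]
      simp
    rw [henum, List.flatMap_append, List.flatMap_cons, List.flatMap_append]
    -- head region: indices 1..100, every line kept, no marker
    rw [pv_flatMap_eq_map _ _ (fun p => pvFmt (max 3 (PySem.Str.len (PySem.Int.toStr (lines.length : Int)))) p.1 p.2)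
        (fun p hp => by
          have hb := pv_enum_bounds _ _ _ hp
          rw [hlt100] at hb
          have h1 : ¬ (p.1 = 101) := by push_cast at hb; omega
          have h2 : ¬ ((100:Int) < p.1 ∧ p.1 ≤ (lines.length:Int) - 50) := by push_cast at hb ⊢; omega
          simp [h1, h2])]
    -- middle region: the element at index 101 emits only the marker …
    have h101 : (101:Int) ≤ (lines.length:Int) - 50 := by omega
    -- … and the rest of the middle emits nothing
    rw [pv_flatMap_eq_nil _ _ (fun p hp => by
          have hb := pv_enum_bounds _ _ _ hp
          rw [hrestlen] at hb
          have h1 : ¬ (p.1 = 101) := by omega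
          have h2 : (100:Int) < p.1 ∧ p.1 ≤ (lines.length:Int) - 50 := by omega
          simp [hskip, h1, h2])]
    -- tail region: indices total-49..total, every line kept, no marker
    rw [pv_flatMap_eq_map _ _ (fun p => pvFmt (max 3 (PySem.Str.len (PySem.Int.toStr (lines.length : Int)))) p.1 p.2)
        (fun p hp => by
          have hb := pv_enum_bounds _ _ _ hp
          have hdl : (lines.drop (lines.length - 50)).length = 50 := by
            rw [List.length_drop]; omega
          rw [hdl] at hb
          have h1 : ¬ (p.1 = 101) := by push_cast at hb; omega
          have h2 : ¬ ((100:Int) < p.1 ∧ p.1 ≤ (lines.length:Int) - 50) := by push_cast at hb ⊢; omega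
          simp [h1, h2])]
    simp [hskip, h101]
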